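-- pv_equiv track=rewrite | github.com/ccstan99/far_comms | src/far_comms/utils/coda_client.py | _fuzzy_match_speaker
-- ===== SOURCE A (Python) =====
-- def _fuzzy_match_speaker(speaker_name: str, contacts: list) -> str:
--     """Fuzzy match speaker name against contacts cache"""
--     speaker_lower = speaker_name.lower()
--     speaker_parts = speaker_lower.split()
--
--     # Try exact match (case insensitive)
--     for contact in contacts:
--         contact_name = contact.get("name", "").lower()
--         if contact_name == speaker_lower:
--             x_handle = contact.get("x_handle", "")
--             if x_handle and x_handle.strip():
--                 return x_handle.strip()
--
--     # Try partial matching - all speaker parts in contact name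
--     for contact in contacts:
--         contact_name = contact.get("name", "").lower()
--         if all(part in contact_name for part in speaker_parts):
--             x_handle = contact.get("x_handle", "")
--             if x_handle and x_handle.strip():
--                 return x_handle.strip()
--
--     # Try reverse - contact name parts in speaker name (for nicknames)
--     for contact in contacts:
--         contact_name = contact.get("name", "").lower()
--         contact_parts = contact_name.split()
--         if len(contact_parts) >= 2:  # At least first + last name
--             if all(part in speaker_lower for part in contact_parts[:2]):
--                 x_handle = contact.get("x_handle", "")
--                 if x_handle and x_handle.strip():
--                     return x_handle.strip()
--
--     # Safe fallback
--     return speaker_name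
-- ===== SOURCE B (Python) =====
-- def _fuzzy_match_speaker(speaker_name: str, contacts: list) -> str:
--     """Fuzzy match speaker name against contacts cache (single pass)"""
--     speaker_lower = speaker_name.lower()
--     speaker_parts = speaker_lower.split()
--
--     partial_hit = None
--     reverse_hit = None
--     for contact in contacts:
--         handle = contact.get("x_handle", "").strip()
--         if not handle:
--             continue  # contacts without a usable handle never match in any pass
--         contact_name = contact.get("name", "").lower()
--         if contact_name == speaker_lower:
--             return handle  # exact match has top priority; first one wins
--         if partial_hit is None and all(p in contact_name for p in speaker_parts):
--             partial_hit = handle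
--         if reverse_hit is None:
--             contact_parts = contact_name.split()
--             if len(contact_parts) >= 2 and all(p in speaker_lower for p in contact_parts[:2]):
--                 reverse_hit = handle
--     if partial_hit is not None:
--         return partial_hit
--     if reverse_hit is not None:
--         return reverse_hit
--     return speaker_name
-- ===== Notes on version B (the rewrite author's own statement) =====
-- stated objective: alternative
-- what changed: Replaces A's three sequential scans over the contacts list (exact, then partial, then reverse) by a single pass that returns immediately on an exact match and records the first partial and first reverse hits in two nullable slots, resolved by priority after the loop.
import Mathlib
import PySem

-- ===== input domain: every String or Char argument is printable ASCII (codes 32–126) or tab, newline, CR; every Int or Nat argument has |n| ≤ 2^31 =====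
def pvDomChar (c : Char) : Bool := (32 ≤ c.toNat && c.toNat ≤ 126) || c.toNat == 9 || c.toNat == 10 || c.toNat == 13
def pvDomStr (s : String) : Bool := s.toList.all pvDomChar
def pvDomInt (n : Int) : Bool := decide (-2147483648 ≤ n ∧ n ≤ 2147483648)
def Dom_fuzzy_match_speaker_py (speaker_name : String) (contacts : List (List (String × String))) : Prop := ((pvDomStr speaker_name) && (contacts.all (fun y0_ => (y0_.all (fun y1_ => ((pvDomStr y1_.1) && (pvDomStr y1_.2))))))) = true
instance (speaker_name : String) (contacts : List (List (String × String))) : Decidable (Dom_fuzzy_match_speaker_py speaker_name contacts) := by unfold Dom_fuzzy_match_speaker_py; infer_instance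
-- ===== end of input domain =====

-- B replaces A's three sequential scans over the contacts by ONE pass that records the first
-- partial and reverse hits in slots and returns exact hits immediately (objective: alternative).

-- ===== PORT A =====
-- contact.get(k, "") on the dict-as-association-list
def pvGet (contact : List (String × String)) (k : String) : String :=
  (PySem.Dict.mk contact).getD k ""

-- first pass: exact name match (case insensitive) with usable handle
def fmaLoop1 (sl : String) : List (List (String × String)) → Option String
  | [] => none
  | c :: rest =>
    let contact_name := PySem.Str.lower (pvGet c "name")
    if contact_name = sl then
      let x := pvGet c "x_handle"
      if x ≠ "" ∧ PySem.Str.strip x ≠ "" then some (PySem.Str.strip x)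
      else fmaLoop1 sl rest
    else fmaLoop1 sl rest

-- second pass: all speaker parts in contact name
def fmaLoop2 (parts : List String) : List (List (String × String)) → Option String
  | [] => none
  | c :: rest =>
    let contact_name := PySem.Str.lower (pvGet c "name")
    if parts.all (fun p => PySem.Str.isIn p contact_name) then
      let x := pvGet c "x_handle"
      if x ≠ "" ∧ PySem.Str.strip x ≠ "" then some (PySem.Str.strip x)
      else fmaLoop2 parts rest
    else fmaLoop2 parts rest

-- third pass: first two contact-name parts in speaker name
def fmaLoop3 (sl : String) : List (List (String × String)) → Option String
  | [] => none
  | c :: rest =>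
    let contact_name := PySem.Str.lower (pvGet c "name")
    let contact_parts := PySem.Str.split₀ contact_name
    if contact_parts.length ≥ 2 ∧ (contact_parts.take 2).all (fun p => PySem.Str.isIn p sl) then
      let x := pvGet c "x_handle"
      if x ≠ "" ∧ PySem.Str.strip x ≠ "" then some (PySem.Str.strip x)
      else fmaLoop3 sl rest
    else fmaLoop3 sl rest

def fuzzy_match_speaker_py (speaker_name : String) (contacts : List (List (String × String))) : String :=
  let speaker_lower := PySem.Str.lower speaker_name
  let speaker_parts := PySem.Str.split₀ speaker_lower
  match fmaLoop1 speaker_lower contacts with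
  | some h => h
  | none =>
    match fmaLoop2 speaker_parts contacts with
    | some h => h
    | none =>
      match fmaLoop3 speaker_lower contacts with
      | some h => h
      | none => speaker_name

-- ===== PORT B =====
-- single pass with two memo slots; exact hits return immediately
def fmaGo (sn sl : String) (parts : List String) :
    List (List (String × String)) → Option String → Option String → String
  | [], p, r =>
    match p with
    | some h => h
    | none => match r with
      | some h => h
      | none => sn
  | c :: rest, p, r =>
    let handle := PySem.Str.strip (pvGet c "x_handle")
    if handle = "" then fmaGo sn sl parts rest p r
    else
      let contact_name := PySem.Str.lower (pvGet c "name")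
      if contact_name = sl then handle
      else
        let p' := if p = none ∧ parts.all (fun q => PySem.Str.isIn q contact_name) then some handle else p
        let r' := if r = none ∧
            (let cps := PySem.Str.split₀ contact_name;
             cps.length ≥ 2 ∧ (cps.take 2).all (fun q => PySem.Str.isIn q sl)) then some handle else r
        fmaGo sn sl parts rest p' r'

def fuzzy_match_speaker_py_alt (speaker_name : String) (contacts : List (List (String × String))) : String :=
  let speaker_lower := PySem.Str.lower speaker_name
  let speaker_parts := PySem.Str.split₀ speaker_lower
  fmaGo speaker_name speaker_lower speaker_parts contacts none none

-- ===== PRECONDITION & SPEC =====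
def Spec_fuzzy_match_speaker_py (speaker_name : String) (contacts : List (List (String × String))) (out : String) : Prop := out = fuzzy_match_speaker_py_alt speaker_name contacts
instance (speaker_name : String) (contacts : List (List (String × String))) (out : String) : Decidable (Spec_fuzzy_match_speaker_py speaker_name contacts out) := by unfold Spec_fuzzy_match_speaker_py; infer_instance

-- ===== CLAIM (what is proved, stated in full; the proofs are below) =====
def Claim_equal_fuzzy_match_speaker_py : Prop := ∀ (speaker_name : String) (contacts : List (List (String × String))), Dom_fuzzy_match_speaker_py speaker_name contacts → Spec_fuzzy_match_speaker_py speaker_name contacts (fuzzy_match_speaker_py speaker_name contacts)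

-- ===== LEMMAS AND PROOFS =====

-- a stripped-nonempty handle is a nonempty handle
theorem strip_ne_imp_ne (x : String) (h : PySem.Str.strip x ≠ "") : x ≠ "" := by
  intro hx; exact h (by subst hx; decide)

-- recording into an empty slot then falling back equals falling back into the if
theorem or_slot (p : Option String) (C : Prop) [Decidable C] (h : String) (t : Option String) :
    (if p = none ∧ C then some h else p).or t = p.or (if C then some h else t) := by
  cases p <;> by_cases hC : C <;> simp [hC]

-- the single pass computes A's three-pass result, for any slot contents
theorem fmaGo_eq (sn sl : String) (parts : List String) :
    ∀ (cs : List (List (String × String))) (p r : Option String),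
      fmaGo sn sl parts cs p r =
        match fmaLoop1 sl cs with
        | some h => h
        | none =>
          match p.or (fmaLoop2 parts cs) with
          | some h => h
          | none =>
            match r.or (fmaLoop3 sl cs) with
            | some h => h
            | none => sn := by
  intro cs
  induction cs with
  | nil => intro p r; cases p <;> cases r <;> simp [fmaGo, fmaLoop1, fmaLoop2, fmaLoop3]
  | cons c rest ih =>
    intro p r
    by_cases hh : PySem.Str.strip (pvGet c "x_handle") = ""
    · -- unusable handle: the contact is skipped by every pass and by the single loop
      have eg : fmaGo sn sl parts (c :: rest) p r = fmaGo sn sl parts rest p r := by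
        simp [fmaGo, hh]
      have e1 : fmaLoop1 sl (c :: rest) = fmaLoop1 sl rest := by simp [fmaLoop1, hh]
      have e2 : fmaLoop2 parts (c :: rest) = fmaLoop2 parts rest := by simp [fmaLoop2, hh]
      have e3 : fmaLoop3 sl (c :: rest) = fmaLoop3 sl rest := by simp [fmaLoop3, hh]
      rw [eg, ih, e1, e2, e3]
    · have hx : pvGet c "x_handle" ≠ "" := strip_ne_imp_ne _ hh
      by_cases he : PySem.Str.lower (pvGet c "name") = sl
      · -- exact match with usable handle: both sides return it at once
        simp [fmaGo, fmaLoop1, hh, he, hx]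
      · -- no exact match: the slots absorb exactly what passes 2 and 3 would find first
        have eg : fmaGo sn sl parts (c :: rest) p r =
            fmaGo sn sl parts rest
              (if p = none ∧ (parts.all (fun q => PySem.Str.isIn q (PySem.Str.lower (pvGet c "name"))) = true)
               then some (PySem.Str.strip (pvGet c "x_handle")) else p)
              (if r = none ∧ ((PySem.Str.split₀ (PySem.Str.lower (pvGet c "name"))).length ≥ 2 ∧
                  ((PySem.Str.split₀ (PySem.Str.lower (pvGet c "name"))).take 2).all (fun q => PySem.Str.isIn q sl) = true)
               then some (PySem.Str.strip (pvGet c "x_handle")) else r) := by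
          simp [fmaGo, hh, he]
        have e1 : fmaLoop1 sl (c :: rest) = fmaLoop1 sl rest := by simp [fmaLoop1, he]
        have e2 : fmaLoop2 parts (c :: rest) =
            (if (parts.all (fun q => PySem.Str.isIn q (PySem.Str.lower (pvGet c "name"))) = true)
             then some (PySem.Str.strip (pvGet c "x_handle")) else fmaLoop2 parts rest) := by
          simp [fmaLoop2, hh, hx]
        have e3 : fmaLoop3 sl (c :: rest) =
            (if ((PySem.Str.split₀ (PySem.Str.lower (pvGet c "name"))).length ≥ 2 ∧
                ((PySem.Str.split₀ (PySem.Str.lower (pvGet c "name"))).take 2).all (fun q => PySem.Str.isIn q sl) = true)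
             then some (PySem.Str.strip (pvGet c "x_handle")) else fmaLoop3 sl rest) := by
          simp [fmaLoop3, hh, hx]
        rw [eg, ih, e1, e2, e3, or_slot, or_slot]

-- ===== VERDICT (by name: the statement is the Claim_ definition above) =====
theorem fuzzy_match_speaker_py_spec : Claim_equal_fuzzy_match_speaker_py := by
  intro speaker_name contacts _
  unfold Spec_fuzzy_match_speaker_py fuzzy_match_speaker_py fuzzy_match_speaker_py_alt
  rw [fmaGo_eq]
  simp
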